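-- pv_equiv track=rewrite | github.com/Aaron-Lilly/symphainy-production | symphainy-platform/foundations/public_works_foundation/infrastructure_adapters/mainframe_processing_adapter.py | _get_subgroup
-- ===== SOURCE A (Python) =====
-- from typing import Dict, Any, Optional, List, Tuple
--
-- def _get_subgroup(parent_level: int, lines: List[Dict[str, Any]]) -> List[Dict[str, Any]]:
--     """
--     Get all fields that have a higher level than parent_level until
--     a field with equal or lower level is encountered.
--     Adopted from legacy get_subgroup function.
--     """
--     output = []
--     for row in lines:
--         level = row.get("level", 0)
--         # Skip level 77 (working storage) and 88 (condition names)
--         if level == 77 or level == 88: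
--             continue
--         elif level > parent_level:
--             output.append(row)
--         else:
--             return output
--     return output
-- ===== SOURCE B (Python) =====
-- def _get_subgroup(parent_level, lines):
--     # Filter out 77/88 rows once, find the first index whose level is not
--     # above parent_level, and slice the prefix before it.
--     filtered = [row for row in lines if row.get("level", 0) not in (77, 88)]
--     stop = next((i for i, row in enumerate(filtered)
--                  if row.get("level", 0) <= parent_level), len(filtered))
--     return filtered[:stop]
-- ===== Notes on version B (the rewrite author's own statement) =====
-- stated objective: idiomatic
-- what changed: Replaces the single accumulate-or-return loop by a filter pass that drops 77/88 rows followed by a first-stop-index search and a prefix slice.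
import Mathlib
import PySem

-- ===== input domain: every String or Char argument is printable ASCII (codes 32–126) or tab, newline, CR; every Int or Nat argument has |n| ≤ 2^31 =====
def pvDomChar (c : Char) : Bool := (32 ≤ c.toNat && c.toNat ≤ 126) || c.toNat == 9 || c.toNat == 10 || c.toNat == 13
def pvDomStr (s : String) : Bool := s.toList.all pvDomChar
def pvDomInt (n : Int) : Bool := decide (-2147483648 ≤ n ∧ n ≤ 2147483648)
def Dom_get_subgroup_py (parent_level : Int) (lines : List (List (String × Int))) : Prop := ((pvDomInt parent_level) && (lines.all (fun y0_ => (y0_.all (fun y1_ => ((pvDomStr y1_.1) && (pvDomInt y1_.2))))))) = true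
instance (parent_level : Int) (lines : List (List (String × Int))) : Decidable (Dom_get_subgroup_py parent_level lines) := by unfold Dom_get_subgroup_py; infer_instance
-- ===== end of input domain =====

-- B replaces A's accumulate-or-return loop by a filter pass (drop 77/88 rows),
-- a first-stop-index search and a prefix slice (idiomatic decomposition, same cost).

-- row.get("level", 0) — shared by both ports (it is the same Python expression in both)
def pvLevel (row : List (String × Int)) : Int := PySem.Dict.getD ⟨row⟩ "level" 0

-- ===== PORT A =====
-- the for-loop of A, with `output` as accumulator; `return output` inside the loop = stop with acc
def pvGoA (parent_level : Int) (acc : List (List (String × Int))) : List (List (String × Int)) → List (List (String × Int))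
  | [] => acc
  | row :: rest =>
    let level := pvLevel row
    if level == 77 || level == 88 then pvGoA parent_level acc rest
    else if level > parent_level then pvGoA parent_level (acc ++ [row]) rest
    else acc

def get_subgroup_py (parent_level : Int) (lines : List (List (String × Int))) : List (List (String × Int)) :=
  pvGoA parent_level [] lines

-- ===== PORT B =====
def get_subgroup_py_alt (parent_level : Int) (lines : List (List (String × Int))) : List (List (String × Int)) :=
  let filtered := lines.filter (fun row => !(pvLevel row == 77 || pvLevel row == 88))
  -- next((i …), len(filtered)) = findIdx (returns length when no match); filtered[:stop] with 0 ≤ stop = take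
  let stop := filtered.findIdx (fun row => pvLevel row ≤ parent_level)
  filtered.take stop

-- ===== PRECONDITION & SPEC =====
def Spec_get_subgroup_py (parent_level : Int) (lines : List (List (String × Int))) (out : List (List (String × Int))) : Prop := out = get_subgroup_py_alt parent_level lines
instance (parent_level : Int) (lines : List (List (String × Int))) (out : List (List (String × Int))) : Decidable (Spec_get_subgroup_py parent_level lines out) := by unfold Spec_get_subgroup_py; infer_instance

-- ===== CLAIM (what is proved, stated in full; the proofs are below) =====
def Claim_equal_get_subgroup_py : Prop := ∀ (parent_level : Int) (lines : List (List (String × Int))), Dom_get_subgroup_py parent_level lines → Spec_get_subgroup_py parent_level lines (get_subgroup_py parent_level lines)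

-- ===== LEMMAS AND PROOFS =====

theorem pvGoA_eq_alt (parent_level : Int) (rest : List (List (String × Int))) :
    ∀ acc, pvGoA parent_level acc rest = acc ++ get_subgroup_py_alt parent_level rest := by
  induction rest with
  | nil => intro acc; simp [pvGoA, get_subgroup_py_alt]
  | cons row rest ih =>
    intro acc
    simp only [pvGoA, get_subgroup_py_alt, List.filter_cons]
    by_cases h77 : (pvLevel row == 77 || pvLevel row == 88) = true
    · simp [h77, ih acc, get_subgroup_py_alt]
    · by_cases hgt : pvLevel row > parent_level
      · have hle : (decide (pvLevel row ≤ parent_level)) = false := by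
          simp; omega
        simp only [h77, hgt, if_true, if_false, Bool.not_false, if_pos]
        rw [ih (acc ++ [row])]
        simp [get_subgroup_py_alt, List.findIdx_cons, hle]
      · have hle : (decide (pvLevel row ≤ parent_level)) = true := by
          simp; omega
        simp [h77, hgt, List.findIdx_cons, hle]

-- ===== VERDICT (by name: the statement is the Claim_ definition above) =====
theorem get_subgroup_py_spec : Claim_equal_get_subgroup_py := by
  intro pl lines _
  unfold Spec_get_subgroup_py get_subgroup_py
  simpa using pvGoA_eq_alt pl lines []
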